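-- pv_equiv track=rewrite | github.com/knikolaevskii/agentic_supplement_advisor | app/services/vectorstore.py | _join_chunks_without_overlap
-- ===== SOURCE A (Python) =====
-- def _join_chunks_without_overlap(chunks: list[str]) -> str:
--     """Join chunk texts, removing overlapping regions between consecutive chunks."""
--     if not chunks:
--         return ""
--     result = chunks[0]
--     for i in range(1, len(chunks)):
--         max_overlap = min(len(result), len(chunks[i]), 200)
--         overlap = 0
--         for j in range(1, max_overlap + 1):
--             if result[-j:] == chunks[i][:j]:
--                 overlap = j
--         result += chunks[i][overlap:]
--     return result
-- ===== SOURCE B (Python) =====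
-- def _join_chunks_without_overlap(chunks: list[str]) -> str:
--     """Join chunk texts, removing overlapping regions between consecutive chunks.
--
--     KMP-based: instead of brute-force comparing every candidate suffix/prefix
--     pair, build combined = c[:cap] + '\x00' + tail and read the largest
--     suffix/prefix overlap off the last entry of its KMP failure (prefix-
--     function) array.  The NUL separator cannot occur in chunk text, so the
--     largest border of combined is exactly the largest overlap.
--     """
--     if not chunks:
--         return ""
--     result = chunks[0]
--     for c in chunks[1:]:
--         cap = min(len(result), len(c), 200)
--         combined = c[:cap] + "\x00" + result[len(result) - cap:]
--         pi = [0] * len(combined)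
--         k = 0
--         for q in range(1, len(combined)):
--             while k > 0 and combined[q] != combined[k]:
--                 k = pi[k - 1]
--             if combined[q] == combined[k]:
--                 k += 1
--             pi[q] = k
--         overlap = pi[-1]
--         result += c[overlap:]
--     return result
-- ===== Notes on version B (the rewrite author's own statement) =====
-- stated objective: alternative
-- what changed: B computes each overlap as the last entry of the KMP failure (prefix-function) array of c[:cap] + NUL-separator + the capped tail of the result, instead of A's brute-force scan that re-compares a suffix/prefix pair for every candidate length.
import Mathlib
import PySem

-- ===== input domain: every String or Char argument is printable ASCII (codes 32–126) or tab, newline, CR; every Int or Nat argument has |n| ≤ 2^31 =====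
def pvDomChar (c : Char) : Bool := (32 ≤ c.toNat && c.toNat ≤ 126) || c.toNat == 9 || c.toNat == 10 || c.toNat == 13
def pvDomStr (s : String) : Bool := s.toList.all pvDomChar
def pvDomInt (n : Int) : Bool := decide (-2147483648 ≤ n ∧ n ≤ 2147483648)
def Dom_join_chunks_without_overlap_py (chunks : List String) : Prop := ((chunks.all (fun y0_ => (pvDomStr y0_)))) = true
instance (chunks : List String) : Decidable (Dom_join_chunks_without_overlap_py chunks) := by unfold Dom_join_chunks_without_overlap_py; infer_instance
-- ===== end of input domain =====

-- B finds each overlap as the last entry of the KMP failure (prefix-function) array of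
-- c[:cap] + NUL + tail instead of A's brute-force scan over all candidate lengths
-- (objective: alternative algorithm, same return value on the printable-ASCII domain).

-- ===== PORT A =====
-- body of A's outer loop: result += chunks[i][overlap:] after the ascending overlap scan
def pvStepA (result ci : String) : String :=
  let max_overlap : Int := min (min (result.length : Int) (ci.length : Int)) 200
  let overlap : Int :=
    (PySem.List.pyRange 1 (max_overlap + 1) 1).foldl (fun ov j =>
      if PySem.Str.slice result (some (-j)) none == PySem.Str.slice ci none (some j)
      then j else ov) 0                                       -- result[-j:] == chunks[i][:j]
  result ++ PySem.Str.slice ci (some overlap) none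

-- literal transliteration of _join_chunks_without_overlap
def join_chunks_without_overlap_py (chunks : List String) : String :=
  if chunks = [] then ""                                      -- if not chunks: return ""
  else
    (PySem.List.pyRange 1 (chunks.length : Int) 1).foldl
      (fun result i => pvStepA result (PySem.List.pyGetD chunks i ""))
      (chunks.headD "")                                       -- result = chunks[0] (chunks ≠ [])

-- ===== PORT B =====
-- Source B's 'while k > 0 and combined[q] != combined[k]: k = pi[k-1]' loop; the fuel
-- argument (called with the current k) only makes the recursion structural: each
-- iteration strictly decreases k because every stored pi value is below its index.
def pvFall (s : List Char) (pi : List Nat) (cq : Char) : Nat → Nat → Nat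
  | 0, k => k
  | fuel + 1, k =>
    if k ≠ 0 ∧ cq ≠ s.getD k ' ' then pvFall s pi cq fuel (pi.getD (k - 1) 0) else k

-- body of Source B's 'for q in range(1, len(combined))' loop, state (pi, k);
-- s.getD q ' ' is combined[q], always in range inside the loop
def pvKmpStep (s : List Char) (st : List Nat × Nat) (q : Nat) : List Nat × Nat :=
  let cq := s.getD q ' '
  let k1 := pvFall s st.1 cq st.2 st.2
  let k2 := if cq = s.getD k1 ' ' then k1 + 1 else k1
  (st.1.set q k2, k2)

-- body of Source B's outer loop: KMP failure array over c[:cap] + '\x00' + tail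
def pvStepB (result c : String) : String :=
  let cap : Int := min (min (result.length : Int) (c.length : Int)) 200
  let combined : List Char :=
    (PySem.Str.slice c none (some cap)).toList
      ++ Char.ofNat 0 :: (PySem.Str.slice result (some ((result.length : Int) - cap)) none).toList
  let fin := (PySem.List.pyRange 1 (combined.length : Int) 1).foldl
      (fun st q => pvKmpStep combined st q.toNat) (List.replicate combined.length 0, 0)
  let overlap : Nat := fin.1.getLastD 0                       -- pi[-1] (combined is nonempty)
  result ++ PySem.Str.slice c (some (overlap : Int)) none     -- result += c[overlap:]

-- literal transliteration of Source B
def join_chunks_without_overlap_py_alt (chunks : List String) : String :=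
  match chunks with
  | [] => ""                                                  -- if not chunks: return ""
  | c0 :: rest => rest.foldl pvStepB c0                       -- for c in chunks[1:]

-- ===== PRECONDITION & SPEC =====
def Spec_join_chunks_without_overlap_py (chunks : List String) (out : String) : Prop := out = join_chunks_without_overlap_py_alt chunks
instance (chunks : List String) (out : String) : Decidable (Spec_join_chunks_without_overlap_py chunks out) := by unfold Spec_join_chunks_without_overlap_py; infer_instance

-- ===== CLAIM (what is proved, stated in full; the proofs are below) =====
def Claim_equal_join_chunks_without_overlap_py : Prop := ∀ (chunks : List String), Dom_join_chunks_without_overlap_py chunks → Spec_join_chunks_without_overlap_py chunks (join_chunks_without_overlap_py chunks)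

-- ===== LEMMAS AND PROOFS =====

-- largest j ≤ n with P j (0 if none): the value of A's keep-last ascending scan
def ascNat (P : Nat → Bool) : Nat → Nat
  | 0 => 0
  | n + 1 => if P (n + 1) then n + 1 else ascNat P n

theorem ascNat_le (P : Nat → Bool) (n : Nat) : ascNat P n ≤ n := by
  induction n with
  | zero => simp [ascNat]
  | succ n ih => simp only [ascNat]; split_ifs <;> omega

theorem ascNat_max (P : Nat → Bool) (n j : Nat) (hj : P j = true) (hle : j ≤ n) :
    j ≤ ascNat P n := by
  induction n with
  | zero => omega
  | succ n ih =>
    simp only [ascNat]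
    by_cases h : P (n + 1)
    · simp [h]; omega
    · simp [h]
      have hj' : j ≠ n + 1 := fun e => h (e ▸ hj)
      exact ih (by omega)

theorem ascNat_sat (P : Nat → Bool) (n : Nat) (h0 : P 0 = true) :
    P (ascNat P n) = true := by
  induction n with
  | zero => simpa [ascNat]
  | succ n ih => simp only [ascNat]; split_ifs with h <;> simp [h, ih]

theorem ascNat_congr (P Q : Nat → Bool) (n : Nat) (h : ∀ j, j ≤ n → P j = Q j) :
    ascNat P n = ascNat Q n := by
  induction n with
  | zero => rfl
  | succ n ih =>
    simp only [ascNat, h (n + 1) (le_refl _)]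
    rw [ih (fun j hj => h j (by omega))]

theorem ascNat_of_false (P : Nat → Bool) (n m : Nat)
    (h : ∀ j, n < j → j ≤ n + m → P j = false) : ascNat P (n + m) = ascNat P n := by
  induction m with
  | zero => rfl
  | succ m ih =>
    have : n + (m + 1) = (n + m) + 1 := by omega
    rw [this]
    simp only [ascNat, h (n + m + 1) (by omega) (by omega)]
    exact ih (fun j h1 h2 => h j h1 (by omega))

-- borders: prefix of length j equal to the suffix of length j
def Brd (t : List Char) (j : Nat) : Prop :=
  j ≤ t.length ∧ t.take j = t.drop (t.length - j)

def brdB (t : List Char) (j : Nat) : Bool := t.take j == t.drop (t.length - j)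

-- longest proper border
def lpb (t : List Char) : Nat := ascNat (brdB t) (t.length - 1)

theorem Brd_zero (t : List Char) : Brd t 0 := by
  refine ⟨Nat.zero_le _, ?_⟩; simp

theorem lpb_lt (t : List Char) (ht : t ≠ []) : lpb t < t.length := by
  have hlen : 0 < t.length := List.length_pos_iff.mpr ht
  unfold lpb
  have h1 := ascNat_le (brdB t) (t.length - 1)
  omega

theorem lpb_Brd (t : List Char) : Brd t (lpb t) := by
  have h0 : brdB t 0 = true := by simp [brdB]
  have := ascNat_sat (brdB t) (t.length - 1) h0
  have hle := ascNat_le (brdB t) (t.length - 1)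
  refine ⟨by unfold lpb; omega, by simpa [brdB] using this⟩

theorem lpb_max (t : List Char) (j : Nat) (hb : Brd t j) (hj : j < t.length) :
    j ≤ lpb t := by
  exact ascNat_max _ _ _ (by simp [brdB, hb.2]) (by omega)

theorem lpb_eq_of (t : List Char) (m : Nat) (hb : Brd t m) (hm : m < t.length)
    (hmax : ∀ j, Brd t j → j < t.length → j ≤ m) : lpb t = m := by
  have h1 : m ≤ lpb t := lpb_max t m hb hm
  have h2 : lpb t ≤ m := hmax _ (lpb_Brd t) (lpb_lt t (by intro h; subst h; simp at hm))
  omega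

-- a border of t is a border of any longer border of t
theorem Brd_take (t : List Char) (k j : Nat) (hk : Brd t k) (hj : Brd t j) (hjk : j ≤ k) :
    Brd (t.take k) j := by
  obtain ⟨hk1, hk2⟩ := hk
  obtain ⟨hj1, hj2⟩ := hj
  have hlen : (t.take k).length = k := by simp; omega
  refine ⟨by omega, ?_⟩
  rw [hlen, List.take_take, min_eq_left hjk, hk2, List.drop_drop]
  have : t.length - k + (k - j) = t.length - j := by omega
  rw [this, hj2]

-- a border of a border of t is a border of t
theorem Brd_trans (t : List Char) (k j : Nat) (hk : Brd t k) (hj : Brd (t.take k) j) :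
    Brd t j := by
  obtain ⟨hk1, hk2⟩ := hk
  obtain ⟨hj1, hj2⟩ := hj
  have hlen : (t.take k).length = k := by simp; omega
  rw [hlen] at hj1 hj2
  rw [List.take_take, min_eq_left hj1] at hj2
  rw [hk2, List.drop_drop] at hj2
  have : t.length - k + (k - j) = t.length - j := by omega
  rw [this] at hj2
  exact ⟨by omega, hj2⟩

-- extending a border by one matching character
theorem Brd_ext (s : List Char) (q j : Nat) (hq : q < s.length) (hj : j ≤ q) :
    Brd (s.take (q + 1)) (j + 1) ↔ Brd (s.take q) j ∧ s.getD j ' ' = s.getD q ' ' := by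
  have hjs : j < s.length := by omega
  have hlq1 : (s.take (q + 1)).length = q + 1 := by simp; omega
  have hlq : (s.take q).length = q := by simp; omega
  have hsj : s.take (j + 1) = s.take j ++ [s.getD j ' '] := by
    rw [List.getD_eq_getElem s ' ' hjs]
    exact (List.take_concat_get' s j hjs).symm
  have hsq : s.take (q + 1) = s.take q ++ [s.getD q ' '] := by
    rw [List.getD_eq_getElem s ' ' hq]
    exact (List.take_concat_get' s q hq).symm
  constructor
  · rintro ⟨-, h2⟩
    rw [hlq1] at h2
    have e1 : (s.take (q + 1)).take (j + 1) = s.take j ++ [s.getD j ' '] := by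
      rw [List.take_take, min_eq_left (by omega), hsj]
    have e2 : (s.take (q + 1)).drop (q + 1 - (j + 1)) =
        (s.take q).drop (q - j) ++ [s.getD q ' '] := by
      rw [hsq]
      have : q + 1 - (j + 1) = q - j := by omega
      rw [this, List.drop_append_of_le_length (by omega)]
    rw [e1, e2] at h2
    have := List.append_inj' h2 (by simp)
    obtain ⟨ha, hb⟩ := this
    refine ⟨⟨by omega, ?_⟩, by simpa using hb⟩
    rw [hlq, List.take_take, min_eq_left hj, ha]
  · rintro ⟨⟨-, h2⟩, hc⟩
    rw [hlq] at h2
    rw [List.take_take, min_eq_left hj] at h2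
    refine ⟨by omega, ?_⟩
    rw [hlq1, List.take_take, min_eq_left (by omega), hsj]
    have : q + 1 - (j + 1) = q - j := by omega
    rw [this, hsq, List.drop_append_of_le_length (by omega), ← h2, hc]

-- the fallback loop returns the largest matching border below q
theorem fall_spec (s : List Char) (pi : List Nat) (q : Nat) (hq : q < s.length)
    (hpi : ∀ i, i + 1 ≤ q → pi.getD i 0 = lpb (s.take (i + 1))) :
    ∀ fuel k, k ≤ fuel → Brd (s.take q) k → k < q →
    (∀ j, Brd (s.take q) j → j < q → s.getD j ' ' = s.getD q ' ' → j ≤ k) →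
    Brd (s.take q) (pvFall s pi (s.getD q ' ') fuel k) ∧
    (pvFall s pi (s.getD q ' ') fuel k) < q ∧
    ((pvFall s pi (s.getD q ' ') fuel k) = 0 ∨
      s.getD q ' ' = s.getD (pvFall s pi (s.getD q ' ') fuel k) ' ') ∧
    (∀ j, Brd (s.take q) j → j < q → s.getD j ' ' = s.getD q ' ' →
      j ≤ pvFall s pi (s.getD q ' ') fuel k) := by
  intro fuel
  induction fuel with
  | zero =>
    intro k hk hb hkq hmax
    simp only [pvFall]
    exact ⟨hb, hkq, by omega, hmax⟩
  | succ fuel ih =>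
    intro k hk hb hkq hmax
    simp only [pvFall]
    split_ifs with hcond
    · obtain ⟨hk0, hne⟩ := hcond
      have hkk : (k - 1) + 1 = k := by omega
      have hp : pi.getD (k - 1) 0 = lpb (s.take k) := by
        rw [hpi (k - 1) (by omega), hkk]
      have hlq : (s.take q).length = q := by simp; omega
      have htk : (s.take q).take k = s.take k := by
        rw [List.take_take, min_eq_left (by omega)]
      have hlk : (s.take k).length = k := by simp; omega
      have hkne : s.take k ≠ [] := by
        intro e; have := congrArg List.length e; rw [hlk] at this; simp at this; omega
      have hlt : lpb (s.take k) < k := by have := lpb_lt (s.take k) hkne; omega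
      have hBk : Brd (s.take q) (lpb (s.take k)) := by
        apply Brd_trans (s.take q) k _ ⟨by omega, hb.2⟩
        rw [htk]; exact lpb_Brd (s.take k)
      have hmax' : ∀ j, Brd (s.take q) j → j < q → s.getD j ' ' = s.getD q ' ' →
          j ≤ lpb (s.take k) := by
        intro j hbj hjq hcj
        have hjk : j ≤ k := hmax j hbj hjq hcj
        have hjk' : j < k := by
          rcases Nat.lt_or_ge j k with h | h
          · exact h
          · exfalso; have : j = k := by omega
            subst this; exact hne hcj.symm
        have : Brd (s.take k) j := by rw [← htk]; exact Brd_take _ _ _ hb hbj hjk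
        have := lpb_max (s.take k) j this (by omega)
        omega
      rw [hp]
      exact ih _ (by omega) hBk (by omega) hmax'
    · push_neg at hcond
      refine ⟨hb, hkq, ?_, hmax⟩
      by_cases hk0 : k = 0
      · exact Or.inl hk0
      · exact Or.inr (hcond hk0)

-- invariant of Source B's main KMP loop
def KInv (s : List Char) (q : Nat) (st : List Nat × Nat) : Prop :=
  st.1.length = s.length ∧ st.2 = lpb (s.take q) ∧
  ∀ i, i < s.length → st.1.getD i 0 = if i + 1 ≤ q then lpb (s.take (i + 1)) else 0

theorem kmp_step (s : List Char) (q : Nat) (st : List Nat × Nat)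
    (hq1 : 1 ≤ q) (hq : q < s.length) (h : KInv s q st) :
    KInv s (q + 1) (pvKmpStep s st q) := by
  obtain ⟨hlen, hk, hpiv⟩ := h
  have hlq : (s.take q).length = q := by simp; omega
  have htne : s.take q ≠ [] := by
    intro e; have := congrArg List.length e; rw [hlq] at this; simp at this; omega
  have hklt : st.2 < q := by
    rw [hk]; have := lpb_lt (s.take q) htne; omega
  have hbK : Brd (s.take q) st.2 := hk ▸ lpb_Brd (s.take q)
  have hmax0 : ∀ j, Brd (s.take q) j → j < q → s.getD j ' ' = s.getD q ' ' → j ≤ st.2 := by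
    intro j hbj hjq _
    rw [hk]; exact lpb_max _ _ hbj (by omega)
  have hpi' : ∀ i, i + 1 ≤ q → st.1.getD i 0 = lpb (s.take (i + 1)) := by
    intro i hi; rw [hpiv i (by omega)]; simp [hi]
  obtain ⟨hb', hlt', hex', hmax'⟩ :=
    fall_spec s st.1 q hq hpi' st.2 st.2 le_rfl hbK hklt hmax0
  set k' := pvFall s st.1 (s.getD q ' ') st.2 st.2 with hk'
  have hlq1 : (s.take (q + 1)).length = q + 1 := by simp; omega
  have hnew : lpb (s.take (q + 1)) = (if s.getD q ' ' = s.getD k' ' ' then k' + 1 else k') := by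
    by_cases hcc : s.getD q ' ' = s.getD k' ' '
    · rw [if_pos hcc]
      apply lpb_eq_of
      · exact (Brd_ext s q k' hq (by omega)).mpr ⟨hb', hcc.symm⟩
      · omega
      · intro j hbj hjlen
        rw [hlq1] at hjlen
        match j with
        | 0 => omega
        | j + 1 =>
          have hme := (Brd_ext s q j hq (by omega)).mp hbj
          have := hmax' j hme.1 (by omega) hme.2
          omega
    · rw [if_neg hcc]
      have hk0 : k' = 0 := by
        rcases hex' with h | h
        · exact h
        · exact absurd h hcc
      rw [hk0]
      apply lpb_eq_of
      · exact Brd_zero _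
      · omega
      · intro j hbj hjlen
        rw [hlq1] at hjlen
        match j with
        | 0 => omega
        | j + 1 =>
          have hme := (Brd_ext s q j hq (by omega)).mp hbj
          have hj0 : j = 0 := by
            have := hmax' j hme.1 (by omega) hme.2
            omega
          exfalso
          apply hcc
          rw [hk0, ← hj0]
          exact hme.2.symm
  simp only [pvKmpStep, ← hk']
  set k2 := if s.getD q ' ' = s.getD k' ' ' then k' + 1 else k' with hk2
  refine ⟨by simp [hlen], by simp [← hnew], ?_⟩
  intro i hi
  rw [List.getD_eq_getElem?_getD]
  by_cases hiq : i = q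
  · subst hiq
    rw [List.getElem?_set_self (by omega)]
    simp only [Option.getD_some]
    rw [if_pos (by omega), ← hnew]
  · rw [List.getElem?_set_ne (fun e => hiq e.symm), ← List.getD_eq_getElem?_getD,
      hpiv i hi]
    by_cases hle : i + 1 ≤ q
    · rw [if_pos hle, if_pos (by omega)]
    · rw [if_neg hle, if_neg (by omega)]

theorem kmp_loop (s : List Char) (hs : s ≠ []) :
    KInv s s.length
      ((PySem.List.pyRange 1 (s.length : Int) 1).foldl
        (fun st q => pvKmpStep s st q.toNat) (List.replicate s.length 0, 0)) := by
  have hpos : 0 < s.length := List.length_pos_iff.mpr hs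
  rw [PySem.List.pyRange_one]
  have he : ((s.length : Int) - 1).toNat = s.length - 1 := by omega
  rw [he, List.foldl_map]
  have hbase : KInv s 1 (List.replicate s.length 0, 0) := by
    have hl1 : (s.take 1).length = 1 := by simp; omega
    have hlpb1 : lpb (s.take 1) = 0 := by unfold lpb; rw [hl1]; rfl
    refine ⟨by simp, by simp [hlpb1], ?_⟩
    intro i hi
    simp only [List.getD_eq_getElem?_getD, List.getElem?_replicate]
    rw [if_pos hi]
    by_cases h0 : i = 0
    · subst h0; simp [hlpb1]
    · rw [if_neg (by omega)]; rfl
  have haux : ∀ m, m ≤ s.length - 1 →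
      KInv s (m + 1) (List.foldl (fun st (k : Nat) => pvKmpStep s st ((1 : Int) + (k : Int)).toNat)
        (List.replicate s.length 0, 0) (List.range m)) := by
    intro m
    induction m with
    | zero => intro _; simpa using hbase
    | succ m ih =>
      intro hm
      rw [List.range_succ, List.foldl_append, List.foldl_cons, List.foldl_nil]
      have ht : ((1 : Int) + (m : Int)).toNat = m + 1 := by omega
      rw [ht]
      exact kmp_step s (m + 1) _ (by omega) (by omega) (ih (by omega))
  have := haux (s.length - 1) le_rfl
  have hfin : s.length - 1 + 1 = s.length := by omega
  rwa [hfin] at this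

-- no border of u ++ sep :: v reaches past the separator, so the longest border
-- is the longest j with u.take j = the length-j suffix of v
theorem lpb_combined (u v : List Char) (sep : Char) (hu : sep ∉ u) (hlen : u.length = v.length) :
    lpb (u ++ sep :: v) =
      ascNat (fun j => u.take j == v.drop (v.length - j)) u.length := by
  set n := u.length with hn
  set s := u ++ sep :: v with hs
  have hls : s.length = n + n + 1 := by simp [hs, ← hlen]; omega
  unfold lpb
  have h1 : s.length - 1 = n + n := by omega
  rw [h1]
  have hfalse : ∀ j, n < j → j ≤ n + n → brdB s j = false := by
    intro j hj1 hj2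
    by_contra hb
    have heq : s.take j = s.drop (s.length - j) := by
      have hb' : brdB s j = true := by
        cases hbe : brdB s j
        · exact absurd hbe hb
        · rfl
      simpa [brdB] using hb'
    set i := j - n - 1 with hi
    have hiq := congrArg (fun l => l[i]?) heq
    simp only at hiq
    rw [List.getElem?_take_of_lt (by omega), List.getElem?_drop] at hiq
    have hidx : s.length - j + i = n := by omega
    rw [hidx] at hiq
    have hL : s[i]? = u[i]? := List.getElem?_append_left (by omega)
    have hR : s[n]? = some sep := by
      rw [hs, List.getElem?_append_right (by omega)]
      simp [← hn]
    rw [hL, hR] at hiq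
    have hiu : i < u.length := by omega
    rw [List.getElem?_eq_getElem hiu] at hiq
    have : u[i] = sep := by simpa using hiq
    exact hu (this ▸ List.getElem_mem hiu)
  rw [show n + n = n + n from rfl] at *
  rw [ascNat_of_false (brdB s) n n hfalse]
  apply ascNat_congr
  intro j hj
  have hvl : v.length = n := hlen.symm
  have hTake : s.take j = u.take j := List.take_append_of_le_length (by omega)
  have hDrop : s.drop (s.length - j) = v.drop (v.length - j) := by
    rw [hs, List.drop_append]
    have h2 : s.length - j ≥ u.length := by omega
    rw [List.drop_eq_nil_of_le (by omega), List.nil_append]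
    have h3 : s.length - j - u.length = (v.length - j) + 1 := by
      simp [hls, ← hn]; omega
    rw [h3]
    rfl
  simp [brdB, hTake, hDrop]

-- A's inner Int fold computes ascNat of the Nat predicate
theorem foldA_inner (result c : String) (P : Nat → Bool) (n : Nat)
    (h : ∀ j : Nat, 1 ≤ j → j ≤ n →
      (PySem.Str.slice result (some (-(j : Int))) none
        == PySem.Str.slice c none (some (j : Int))) = P j) :
    List.foldl (fun (ov : Int) (k : Nat) =>
      if PySem.Str.slice result (some (-(1 + (k : Int)))) none
          == PySem.Str.slice c none (some (1 + (k : Int)))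
      then 1 + (k : Int) else ov) 0 (List.range n) = ((ascNat P n : Nat) : Int) := by
  induction n with
  | zero => simp [ascNat]
  | succ n ih =>
    rw [List.range_succ, List.foldl_append]
    simp only [List.foldl_cons, List.foldl_nil]
    have hcast : (1 + (n : Int)) = ((n + 1 : Nat) : Int) := by push_cast; ring
    rw [hcast, h (n + 1) (by omega) (le_refl _), ih (fun j hj1 hj2 => h j hj1 (by omega))]
    by_cases hp : P (n + 1) <;> simp [ascNat, hp]

set_option maxHeartbeats 2000000 in
theorem step_eq (r c : String) (hr : pvDomStr r = true) (hc : pvDomStr c = true) :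
    pvStepA r c = pvStepB r c := by
  have hlr : r.toList.length = r.length := by simp
  have hlc : c.toList.length = c.length := by simp
  simp only [pvStepA, pvStepB]
  set cap : Int := min (min (r.length : Int) (c.length : Int)) 200 with hcap
  set n : Nat := cap.toNat with hn2
  have hcap0 : (0 : Int) ≤ cap := by simp [hcap]
  have hnI : (n : Int) = cap := Int.toNat_of_nonneg hcap0
  have hnr : n ≤ r.length := by omega
  have hnc : n ≤ c.length := by omega
  set P : Nat → Bool :=
    fun j => decide (r.toList.drop (r.toList.length - j) = c.toList.take j) with hP
  have hcondA : ∀ j : Nat, 1 ≤ j → j ≤ n →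
      (PySem.Str.slice r (some (-(j : Int))) none
        == PySem.Str.slice c none (some (j : Int))) = P j := by
    intro j hj1 hj2
    rw [Bool.eq_iff_iff, beq_iff_eq, ← String.toList_inj]
    rw [PySem.Str.toList_slice, PySem.Str.toList_slice]
    simp only [PySem.Chars.slice_eq_listSlice]
    rw [PySem.List.slice_from_neg_natCast _ j (by omega), PySem.List.slice_to_natCast]
    simp [hP]
  have hovA :
      List.foldl (fun (ov : Int) j =>
        if PySem.Str.slice r (some (-j)) none == PySem.Str.slice c none (some j)
        then j else ov) 0 (PySem.List.pyRange 1 (cap + 1) 1) = ((ascNat P n : Nat) : Int) := by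
    rw [PySem.List.pyRange_one]
    have he : (cap + 1 - 1).toNat = n := by omega
    rw [he, List.foldl_map]
    exact foldA_inner r c P n hcondA
  rw [hovA]
  -- B side: identify the combined list
  have hu : (PySem.Str.slice c none (some cap)).toList = c.toList.take n := by
    rw [PySem.Str.toList_slice]
    simp only [PySem.Chars.slice_eq_listSlice]
    rw [← hnI, PySem.List.slice_to_natCast]
  have harg : (r.length : Int) - cap = ((r.length - n : Nat) : Int) := by push_cast; omega
  have hv : (PySem.Str.slice r (some ((r.length : Int) - cap)) none).toList
      = r.toList.drop (r.length - n) := by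
    rw [PySem.Str.toList_slice]
    simp only [PySem.Chars.slice_eq_listSlice]
    rw [harg, PySem.List.slice_from_natCast]
  rw [hu, hv]
  set u : List Char := c.toList.take n with hudef
  set v : List Char := r.toList.drop (r.length - n) with hvdef
  set sp : Char := Char.ofNat 0 with hsp
  set s : List Char := u ++ sp :: v with hsdef
  have hul : u.length = n := by simp [hudef]; omega
  have hvl : v.length = n := by simp [hvdef]; omega
  have hsne : s ≠ [] := by simp [hsdef]
  obtain ⟨hl, hk, hpiv⟩ := kmp_loop s hsne
  have hslen : 0 < s.length := List.length_pos_iff.mpr hsne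
  -- pi[-1] is the longest proper border of the combined list
  have hgl : ∀ (pi : List Nat), pi.length = s.length →
      (∀ i, i < s.length → pi.getD i 0 = if i + 1 ≤ s.length then lpb (s.take (i + 1)) else 0) →
      pi.getLastD 0 = lpb s := by
    intro pi hlp hp
    rw [List.getLastD_eq_getLast?, List.getLast?_eq_getElem?, ← List.getD_eq_getElem?_getD,
      hlp, hp (s.length - 1) (by omega)]
    rw [if_pos (by omega)]
    have : s.length - 1 + 1 = s.length := by omega
    rw [this, List.take_length]
  rw [hgl _ hl hpiv]
  -- the NUL separator occurs in neither side
  have hsep : sp ∉ u := by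
    intro hmem
    have hmem' : sp ∈ c.toList := List.mem_of_mem_take hmem
    have := (List.all_eq_true.mp hc) sp hmem'
    simp [hsp, pvDomChar] at this
  have hcomb := lpb_combined u v sp hsep (by omega)
  rw [hul] at hcomb
  rw [hcomb]
  -- the border predicate of the combined list is A's overlap predicate
  have hQP : ascNat (fun j => u.take j == v.drop (v.length - j)) n = ascNat P n := by
    apply ascNat_congr
    intro j hj
    have h1 : u.take j = c.toList.take j := by
      rw [hudef, List.take_take, min_eq_left hj]
    have h2 : v.drop (v.length - j) = r.toList.drop (r.toList.length - j) := by
      rw [hvl, hvdef, List.drop_drop]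
      congr 1
      omega
    rw [h1, h2, Bool.eq_iff_iff, beq_iff_eq]
    simp [hP, eq_comm]
  rw [hQP]

-- the computed overlap is never negative
theorem foldA_nonneg (l : List Int) (f : Int → Bool) :
    ∀ init : Int, 0 ≤ init → (∀ x ∈ l, 0 ≤ x) →
    0 ≤ l.foldl (fun ov j => if f j then j else ov) init := by
  induction l with
  | nil => intro init h _; simpa using h
  | cons x xs ih =>
    intro init h hall
    simp only [List.foldl_cons]
    apply ih
    · by_cases hx : f x <;> simp [hx, h, hall x (by simp)]
    · intro y hy; exact hall y (by simp [hy])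

theorem domStr_stepA (r c : String) (hr : pvDomStr r = true) (hc : pvDomStr c = true) :
    pvDomStr (pvStepA r c) = true := by
  unfold pvDomStr at hr hc ⊢
  simp only [pvStepA]
  set ov : Int := (PySem.List.pyRange 1 (min (min (r.length : Int) (c.length : Int)) 200 + 1) 1).foldl
      (fun ov j => if PySem.Str.slice r (some (-j)) none == PySem.Str.slice c none (some j)
        then j else ov) 0 with hov
  have h0 : 0 ≤ ov := by
    apply foldA_nonneg
    · omega
    · intro x hx
      have := (PySem.List.mem_pyRange_one).mp hx
      omega
  rw [String.toList_append, List.all_append, Bool.and_eq_true]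
  refine ⟨hr, ?_⟩
  have hsl : (PySem.Str.slice c (some ov) none).toList = c.toList.drop ov.toNat := by
    conv_lhs => rw [show ov = ((ov.toNat : Nat) : Int) from (Int.toNat_of_nonneg h0).symm]
    rw [PySem.Str.toList_slice]
    simp only [PySem.Chars.slice_eq_listSlice]
    rw [PySem.List.slice_from_natCast]
  rw [hsl]
  rw [List.all_eq_true] at hc ⊢
  intro x hx
  exact hc x (List.mem_of_mem_drop hx)

theorem fold_eq (rest : List String) : ∀ r : String, pvDomStr r = true →
    (∀ c ∈ rest, pvDomStr c = true) →
    rest.foldl pvStepA r = rest.foldl pvStepB r := by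
  induction rest with
  | nil => intro r _ _; simp only [List.foldl_nil]
  | cons c rest ih =>
    intro r hr hall
    have hc : pvDomStr c = true := hall c (by simp)
    simp only [List.foldl_cons]
    rw [← step_eq r c hr hc]
    exact ih _ (domStr_stepA r c hr hc) (fun d hd => hall d (by simp [hd]))

-- ===== VERDICT (by name: the statement is the Claim_ definition above) =====
theorem join_chunks_without_overlap_py_spec : Claim_equal_join_chunks_without_overlap_py := by
  intro chunks hdom
  unfold Spec_join_chunks_without_overlap_py
  cases chunks with
  | nil => rfl
  | cons c0 rest =>
    simp only [join_chunks_without_overlap_py, join_chunks_without_overlap_py_alt]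
    rw [if_neg (by simp)]
    rw [PySem.List.foldl_pyRange_pyGetD' (c0 :: rest) "" pvStepA ((c0 :: rest).headD "")
      (by norm_num)]
    have hdrop : List.drop (1 : Int).toNat (c0 :: rest) = rest := by rfl
    rw [hdrop]
    simp only [List.headD_cons]
    unfold Dom_join_chunks_without_overlap_py at hdom
    simp only [List.all_cons, Bool.and_eq_true, List.all_eq_true] at hdom
    exact fold_eq rest c0 hdom.1 hdom.2
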